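-- pv_equiv track=rewrite | github.com/Educorreia932/FEUP-FPRO | PE/PE2/exactly.py | exactly
-- ===== SOURCE A (Python) =====
-- def exactly(s):
--     counter = 0
--     interrogation = 0
--     index = 0
--     result = ()
--     numbers = ["0", "1", "2", "3", "4", "5", "6", "7", "8", "9"]
--     numbers_list = []
--
--     for character in s:
--         if character in numbers:
--             numbers_list.append((character, counter))
--         counter += 1
--
--     for number in numbers_list:
--
--         low = number[1]
--         lower = number[0]
--
--         if index + 1 > len(numbers_list) - 1:
--             break
--
--         high = numbers_list[index + 1][1]
--         higher = numbers_list[index + 1][0]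
--
--         interval = s[low: high]
--
--         if (int(lower) + int(higher)) == 10:
--             for char in interval:
--                 if char == "?":
--                     interrogation += 1
--
--             if interrogation != 3:
--                 result = (lower + higher,)
--                 return "The sequence " + s + " is NOT OK with first violation with pair: " + str(result)
--
--             else:
--                 result += (lower + higher,)
--
--         interrogation = 0
--         index += 1
--
--     return "The sequence " + s + " is OK with the pairs: " + str(result)
-- ===== SOURCE B (Python) =====
-- def exactly(s):
--     prev = None
--     q = 0
--     pairs = []
--     for ch in s:
--         if ch == "?":
--             q += 1
--         elif ch.isdigit():
--             if prev is not None and int(prev) + int(ch) == 10: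
--                 if q != 3:
--                     return ("The sequence " + s +
--                             " is NOT OK with first violation with pair: " + str((prev + ch,)))
--                 pairs.append(prev + ch)
--             prev = ch
--             q = 0
--     return "The sequence " + s + " is OK with the pairs: " + str(tuple(pairs))
-- ===== Notes on version B (the rewrite author's own statement) =====
-- stated objective: faster
-- what changed: A builds a (digit, position) list in a first pass and then, for each adjacent digit pair, re-slices the string s[low:high] and rescans the slice to count question marks; B is a single pass over the string keeping only the previous digit and a running question-mark counter, so the digit-position list and the slice rescans disappear.
import Mathlib
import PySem

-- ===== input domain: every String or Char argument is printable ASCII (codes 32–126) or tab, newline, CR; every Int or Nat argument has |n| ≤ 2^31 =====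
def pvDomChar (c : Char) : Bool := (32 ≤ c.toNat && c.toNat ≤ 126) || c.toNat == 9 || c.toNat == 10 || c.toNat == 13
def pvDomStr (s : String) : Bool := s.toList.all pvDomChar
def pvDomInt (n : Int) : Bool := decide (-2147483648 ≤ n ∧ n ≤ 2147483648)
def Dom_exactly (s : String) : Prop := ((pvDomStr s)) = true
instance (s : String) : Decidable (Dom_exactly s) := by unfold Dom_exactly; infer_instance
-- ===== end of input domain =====

-- B replaces A's build-digit-list-then-reslice-and-rescan algorithm by one pass over the string
-- keeping only the previous digit and a running '?' counter (objective: faster; measured).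

-- shared formatting helpers: Python's str() of a tuple of digit-only strings
def pvTupleRepr : List String → String
  | [] => "()"
  | [x] => "('" ++ x ++ "',)"
  | x :: xs => "(" ++ String.intercalate ", " ((x :: xs).map (fun y => "'" ++ y ++ "'")) ++ ")"

def pvOk (s : String) (res : List String) : String :=
  "The sequence " ++ s ++ " is OK with the pairs: " ++ pvTupleRepr res

def pvNotOk (s : String) (pair : String) : String :=
  "The sequence " ++ s ++ " is NOT OK with first violation with pair: " ++ pvTupleRepr [pair]

-- int("d") for a single digit character (exact: both loops only apply it to '0'..'9')
def pvDigitVal (c : Char) : Int := (c.toNat : Int) - 48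

-- ===== PORT A =====
def pvNumbers : List Char := ['0', '1', '2', '3', '4', '5', '6', '7', '8', '9']

-- first loop: numbers_list built by append, with the running counter
def pvBuild (cs : List Char) : List (Char × Int) :=
  (cs.foldl (fun (st : List (Char × Int) × Int) c =>
      (if pvNumbers.contains c then st.1 ++ [(c, st.2)] else st.1, st.2 + 1))
    (([] : List (Char × Int)), (0 : Int))).1

-- the inner "for char in interval" counting loop
def pvCountQ (l : List Char) (acc : Int) : Int :=
  l.foldl (fun i ch => if ch == '?' then i + 1 else i) acc

-- second loop: walks numbers_list carrying index; the break guard and numbers_list[index+1]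
def pvLoopA (s : String) (full : List (Char × Int)) :
    List (Char × Int) → Nat → List String → String
  | [], _, result => pvOk s result
  | (lower, low) :: rest, index, result =>
    if (index : Int) + 1 > (full.length : Int) - 1 then pvOk s result  -- break
    else
      -- numbers_list[index+1]: in range by the break guard
      let nxt := PySem.List.pyGetD full ((index : Int) + 1) ('0', 0)
      let higher := nxt.1
      let high := nxt.2
      let interval := PySem.List.slice s.toList (some low) (some high)  -- s[low:high]
      if pvDigitVal lower + pvDigitVal higher = 10 then
        if pvCountQ interval 0 ≠ 3 then
          pvNotOk s (String.ofList [lower] ++ String.ofList [higher])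
        else pvLoopA s full rest (index + 1) (result ++ [String.ofList [lower] ++ String.ofList [higher]])
      else pvLoopA s full rest (index + 1) result

def exactly (s : String) : String :=
  pvLoopA s (pvBuild s.toList) (pvBuild s.toList) 0 []

-- ===== PORT B =====
-- one pass: prev = last digit seen (None at first), q = '?' count since that digit.
-- ch.isdigit() on a single ASCII char is Char.isDigit (exact on the printable-ASCII domain).
def pvLoopB (s : String) : List Char → Option Char → Nat → List String → String
  | [], _, _, pairs => pvOk s pairs
  | ch :: rest, prev, q, pairs =>
    if ch == '?' then pvLoopB s rest prev (q + 1) pairs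
    else if ch.isDigit then
      (match prev with
       | some p =>
         if pvDigitVal p + pvDigitVal ch = 10 then
           if q ≠ 3 then pvNotOk s (String.ofList [p] ++ String.ofList [ch])
           else pvLoopB s rest (some ch) 0 (pairs ++ [String.ofList [p] ++ String.ofList [ch]])
         else pvLoopB s rest (some ch) 0 pairs
       | none => pvLoopB s rest (some ch) 0 pairs)
    else pvLoopB s rest prev q pairs

def exactly_alt (s : String) : String := pvLoopB s s.toList none 0 []

-- ===== PRECONDITION & SPEC =====
def Spec_exactly (s : String) (out : String) : Prop := out = exactly_alt s
instance (s : String) (out : String) : Decidable (Spec_exactly s out) := by unfold Spec_exactly; infer_instance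

-- ===== CLAIM (what is proved, stated in full; the proofs are below) =====
def Claim_equal_exactly : Prop := ∀ (s : String), Dom_exactly s → Spec_exactly s (exactly s)

-- ===== LEMMAS AND PROOFS =====

-- the two digit tests agree
theorem pv_dig_iff (c : Char) : pvNumbers.contains c = c.isDigit := by
  have h1 : pvNumbers.contains c = true ↔ (48 ≤ c.toNat ∧ c.toNat ≤ 57) := by
    simp [pvNumbers, List.contains_eq_mem, Char.ext_iff, UInt32.ext_iff]
    omega
  have h2 : c.isDigit = true ↔ (48 ≤ c.toNat ∧ c.toNat ≤ 57) := by
    simp [Char.isDigit, UInt32.le_iff_toNat_le]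
  exact Bool.coe_iff_coe.mp (h1.trans h2.symm)

theorem pv_dig_ne_q {c : Char} (h : pvNumbers.contains c = true) : (c == '?') = false := by
  have h2 : c.toNat ≠ 63 := by
    simp [pvNumbers, List.contains_eq_mem, Char.ext_iff, UInt32.ext_iff] at h
    omega
  simp [Char.ext_iff, UInt32.ext_iff]
  omega

-- structural form of numbers_list
def pvDigits : List Char → Nat → List (Char × Int)
  | [], _ => []
  | c :: cs, n => if pvNumbers.contains c then (c, (n : Int)) :: pvDigits cs (n + 1) else pvDigits cs (n + 1)

theorem pv_build_eq_aux (cs : List Char) :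
    ∀ (acc : List (Char × Int)) (n : Nat),
      (cs.foldl (fun (st : List (Char × Int) × Int) c =>
          (if pvNumbers.contains c then st.1 ++ [(c, st.2)] else st.1, st.2 + 1)) (acc, (n : Int))).1
        = acc ++ pvDigits cs n := by
  induction cs with
  | nil => simp [pvDigits]
  | cons c cs ih =>
    intro acc n
    have hn : ((n : Int) + 1) = ((n + 1 : Nat) : Int) := by push_cast; ring
    by_cases h : pvNumbers.contains c = true
    · simp only [List.foldl_cons, h, if_pos, hn, ih, pvDigits]
      simp
    · simp only [List.foldl_cons, Bool.not_eq_true] at *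
      simp only [h, Bool.false_eq_true, hn, ih, pvDigits]
      simp

theorem pv_build_eq (cs : List Char) : pvBuild cs = pvDigits cs 0 := by
  have := pv_build_eq_aux cs [] 0
  simpa [pvBuild] using this

-- pvCountQ is '?'-count
theorem pv_countQ_eq (l : List Char) : ∀ a : Int, pvCountQ l a = a + (l.count '?' : Int) := by
  induction l with
  | nil => simp [pvCountQ]
  | cons c l ih =>
    intro a
    by_cases h : (c == '?') = true
    · have hc : c = '?' := eq_of_beq h
      simp only [pvCountQ, List.foldl_cons, h, if_pos] at *
      rw [ih, List.count_cons]
      push_cast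
      simp [hc]
      ring
    · have hc : ¬ c = '?' := by simpa using h
      simp only [pvCountQ, List.foldl_cons] at *
      rw [if_neg h, ih, List.count_cons]
      simp [hc]

-- A's second loop with the index/full-list plumbing removed
def pvLoopP (s : String) (cs : List Char) : List (Char × Int) → List String → String
  | [], res => pvOk s res
  | [_], res => pvOk s res
  | (a, pa) :: (b, pb) :: rest, res =>
    if pvDigitVal a + pvDigitVal b = 10 then
      if pvCountQ (PySem.List.slice cs (some pa) (some pb)) 0 ≠ 3 then
        pvNotOk s (String.ofList [a] ++ String.ofList [b])
      else pvLoopP s cs ((b, pb) :: rest) (res ++ [String.ofList [a] ++ String.ofList [b]])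
    else pvLoopP s cs ((b, pb) :: rest) res

theorem pv_loopA_eq_loopP (s : String) (full : List (Char × Int)) :
    ∀ (l : List (Char × Int)) (index : Nat) (res : List String),
      l = full.drop index → pvLoopA s full l index res = pvLoopP s s.toList l res := by
  intro l
  induction l with
  | nil => intro index res _; simp [pvLoopA, pvLoopP]
  | cons x l ih =>
    intro index res hdrop
    obtain ⟨lower, low⟩ := x
    have hlen : full.length = index + (l.length + 1) := by
      have := congrArg List.length hdrop
      simp [List.length_drop] at this
      omega
    cases l with
    | nil =>
      -- break guard fires
      have hg : (index : Int) + 1 > (full.length : Int) - 1 := by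
        simp at hlen; omega
      simp only [pvLoopA, pvLoopP, if_pos hg]
    | cons y t =>
      obtain ⟨higher, high⟩ := y
      have hg : ¬ ((index : Int) + 1 > (full.length : Int) - 1) := by
        simp at hlen; omega
      have hget : full[index + 1]? = some (higher, high) := by
        have h1 : (full.drop index)[1]? = some (higher, high) := by rw [← hdrop]; rfl
        rwa [List.getElem?_drop] at h1
      have hgetD : PySem.List.pyGetD full ((index : Int) + 1) ('0', 0) = (higher, high) := by
        have : ((index : Int) + 1) = ((index + 1 : Nat) : Int) := by push_cast; ring
        rw [this, PySem.List.pyGetD_natCast, List.getD_eq_getElem?_getD, hget]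
        rfl
      have hrec : (higher, high) :: t = full.drop (index + 1) := by
        have := congrArg List.tail hdrop
        simpa [List.tail_drop] using this
      simp only [pvLoopA, pvLoopP, if_neg hg, hgetD]
      by_cases hsum : pvDigitVal lower + pvDigitVal higher = 10
      · simp only [if_pos hsum]
        by_cases hq : pvCountQ (PySem.List.slice s.toList (some low) (some high)) 0 ≠ 3
        · simp only [if_pos hq]
        · simp only [if_neg hq]
          exact ih (index + 1) _ hrec
      · simp only [if_neg hsum]
        exact ih (index + 1) _ hrec

-- adjacent-digit-pair stream for B's loop
def pvPairs : List Char → Option Char → Nat → List (Char × Char × Nat)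
  | [], _, _ => []
  | ch :: rest, prev, q =>
    if ch == '?' then pvPairs rest prev (q + 1)
    else if ch.isDigit then
      (match prev with
       | some p => (p, ch, q) :: pvPairs rest (some ch) 0
       | none => pvPairs rest (some ch) 0)
    else pvPairs rest prev q

def pvProcess (s : String) : List (Char × Char × Nat) → List String → String
  | [], res => pvOk s res
  | (a, b, q) :: rest, res =>
    if pvDigitVal a + pvDigitVal b = 10 then
      if q ≠ 3 then pvNotOk s (String.ofList [a] ++ String.ofList [b])
      else pvProcess s rest (res ++ [String.ofList [a] ++ String.ofList [b]])
    else pvProcess s rest res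

theorem pv_loopB_eq_process (s : String) :
    ∀ (cs : List Char) (prev : Option Char) (q : Nat) (res : List String),
      pvLoopB s cs prev q res = pvProcess s (pvPairs cs prev q) res := by
  intro cs
  induction cs with
  | nil => intro prev q res; simp [pvLoopB, pvPairs, pvProcess]
  | cons ch rest ih =>
    intro prev q res
    by_cases hq : (ch == '?') = true
    · simp only [pvLoopB, pvPairs, if_pos hq]; exact ih _ _ _
    · by_cases hd : ch.isDigit = true
      · cases prev with
        | none => simp only [pvLoopB, pvPairs, if_neg hq, if_pos hd]; exact ih _ _ _
        | some p =>
          simp only [pvLoopB, pvPairs, if_neg hq, if_pos hd]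
          by_cases hsum : pvDigitVal p + pvDigitVal ch = 10
          · by_cases h3 : q ≠ 3
            · simp only [pvProcess, if_pos hsum, if_pos h3]
            · simp only [pvProcess, if_pos hsum, if_neg h3]; exact ih _ _ _
          · simp only [pvProcess, if_neg hsum]; exact ih _ _ _
      · simp only [pvLoopB, pvPairs, if_neg hq, if_neg hd]; exact ih _ _ _

-- digit-free prefix lemmas
theorem pv_digits_append (u : List Char) (h : ∀ x ∈ u, pvNumbers.contains x = false) :
    ∀ (rest : List Char) (n : Nat), pvDigits (u ++ rest) n = pvDigits rest (n + u.length) := by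
  induction u with
  | nil => simp
  | cons x u ih =>
    intro rest n
    have hx : pvNumbers.contains x = false := h x (by simp)
    have ih' := ih (fun y hy => h y (by simp [hy]))
    simp only [List.cons_append, pvDigits, hx, Bool.false_eq_true, if_false, ih']
    congr 1
    simp; omega

theorem pv_pairs_append (u : List Char) (h : ∀ x ∈ u, pvNumbers.contains x = false) :
    ∀ (c2 : Char) (v : List Char) (prev : Option Char) (q : Nat), pvNumbers.contains c2 = true →
      pvPairs (u ++ c2 :: v) prev q
        = (match prev with
           | some p => (p, c2, q + u.count '?') :: pvPairs v (some c2) 0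
           | none => pvPairs v (some c2) 0) := by
  induction u with
  | nil =>
    intro c2 v prev q hc2
    have hq : (c2 == '?') = false := pv_dig_ne_q hc2
    have hd : c2.isDigit = true := by rw [← pv_dig_iff]; exact hc2
    simp only [List.nil_append, pvPairs, hq, Bool.false_eq_true, if_false, if_pos hd]
    cases prev <;> simp
  | cons x u ih =>
    intro c2 v prev q hc2
    have hx : pvNumbers.contains x = false := h x (by simp)
    have hd : x.isDigit = false := by rw [← pv_dig_iff]; exact hx
    have ih' := ih (fun y hy => h y (by simp [hy])) c2 v prev
    by_cases hq : (x == '?') = true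
    · have hx' : x = '?' := eq_of_beq hq
      simp only [List.cons_append, pvPairs, if_pos hq]
      rw [ih' (q + 1) hc2]
      cases prev <;> simp [hx']
      omega
    · have hx'' : ¬ x = '?' := by simpa using hq
      simp only [List.cons_append, pvPairs, if_neg hq, hd, Bool.false_eq_true, if_false]
      rw [ih' q hc2]
      cases prev <;> simp [hx'']

theorem pv_pairs_nil (u : List Char) (h : ∀ x ∈ u, pvNumbers.contains x = false) :
    ∀ (prev : Option Char) (q : Nat), pvPairs u prev q = [] := by
  induction u with
  | nil => intro prev q; rfl
  | cons x u ih =>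
    intro prev q
    have hx : pvNumbers.contains x = false := h x (by simp)
    have hd : x.isDigit = false := by rw [← pv_dig_iff]; exact hx
    have ih' := ih (fun y hy => h y (by simp [hy]))
    by_cases hq : (x == '?') = true
    · simp only [pvPairs, if_pos hq, ih']
    · simp only [pvPairs, if_neg hq, hd, Bool.false_eq_true, if_false, ih']

theorem pv_slice_mid (pre u v : List Char) (c c2 : Char) :
    PySem.List.slice (pre ++ c :: (u ++ c2 :: v)) (some (pre.length : Int))
        (some ((pre.length + 1 + u.length : Nat) : Int)) = c :: u := by
  rw [PySem.List.slice_natCast]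
  have h1 : (pre ++ c :: (u ++ c2 :: v)).drop pre.length = c :: (u ++ c2 :: v) := by
    rw [List.drop_left]
  rw [h1]
  have h2 : pre.length + 1 + u.length - pre.length = u.length + 1 := by omega
  rw [h2, List.take_succ_cons]
  congr 1
  exact List.take_left

-- main bridge: from a digit at position pre.length onward, both sides agree
theorem pv_main (n : Nat) : ∀ (s : String) (suf pre : List Char) (c : Char) (res : List String),
    suf.length = n → pvNumbers.contains c = true →
    pvLoopP s (pre ++ c :: suf) ((c, (pre.length : Int)) :: pvDigits suf (pre.length + 1)) res
      = pvProcess s (pvPairs suf (some c) 0) res := by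
  induction n using Nat.strong_induction_on with
  | _ n ih =>
    intro s suf pre c res hlen hc
    have hsplit : suf = suf.takeWhile (fun x => !(pvNumbers.contains x))
        ++ suf.dropWhile (fun x => !(pvNumbers.contains x)) := (List.takeWhile_append_dropWhile).symm
    have hufree : ∀ x ∈ suf.takeWhile (fun x => !(pvNumbers.contains x)), pvNumbers.contains x = false := by
      intro x hx
      have := List.mem_takeWhile_imp hx
      simpa using this
    cases hdd : suf.dropWhile (fun x => !(pvNumbers.contains x)) with
    | nil =>
      rw [hdd, List.append_nil] at hsplit
      have hdig : pvDigits suf (pre.length + 1) = [] := by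
        rw [hsplit, ← List.append_nil (suf.takeWhile _), pv_digits_append _ hufree]
        rfl
      have hpr : pvPairs suf (some c) 0 = [] := by
        rw [hsplit]; exact pv_pairs_nil _ hufree _ _
      rw [hdig, hpr]
      rfl
    | cons c2 v =>
      have hc2 : pvNumbers.contains c2 = true := by
        have h2 : (suf.dropWhile (fun x => !(pvNumbers.contains x))) ≠ [] := by rw [hdd]; simp
        have h3 := List.head_dropWhile_not (fun x => !(pvNumbers.contains x)) h2
        have h4 : (suf.dropWhile (fun x => !(pvNumbers.contains x))).head h2 = c2 := by
          simp only [hdd, List.head_cons]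
        rw [h4] at h3
        simpa using h3
      rw [hdd] at hsplit
      set u := suf.takeWhile (fun x => !(pvNumbers.contains x)) with hu
      -- structure of the digit list
      have hdig : pvDigits suf (pre.length + 1)
          = (c2, ((pre.length + 1 + u.length : Nat) : Int)) :: pvDigits v (pre.length + 1 + u.length + 1) := by
        rw [hsplit, pv_digits_append _ hufree, pvDigits]
        simp only [hc2, if_pos]
      -- the pair stream
      have hpr : pvPairs suf (some c) 0 = (c, c2, u.count '?') :: pvPairs v (some c2) 0 := by
        rw [hsplit, pv_pairs_append _ hufree _ _ _ _ hc2]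
        simp
      -- the slice and its '?'-count
      have hslice : PySem.List.slice (pre ++ c :: suf) (some (pre.length : Int))
          (some ((pre.length + 1 + u.length : Nat) : Int)) = c :: u := by
        rw [hsplit]
        exact pv_slice_mid pre u v c c2
      have hcnt : pvCountQ (c :: u) 0 = (u.count '?' : Int) := by
        rw [pv_countQ_eq]
        simp [List.count_cons, pv_dig_ne_q hc]
      -- recursion set-up
      have hlenv : v.length < n := by
        have := congrArg List.length hsplit
        simp at this
        omega
      rw [hdig, hpr]
      simp only [pvLoopP, pvProcess, hslice, hcnt]
      have hq_iff : ((u.count '?' : Int) ≠ 3) ↔ (u.count '?' ≠ 3) := by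
        constructor <;> intro hx hy <;> exact hx (by exact_mod_cast hy)
      have hstep : ∀ res' : List String,
          pvLoopP s (pre ++ c :: suf)
            ((c2, ((pre.length + 1 + u.length : Nat) : Int)) :: pvDigits v (pre.length + 1 + u.length + 1)) res'
          = pvProcess s (pvPairs v (some c2) 0) res' := by
        intro res'
        have hpre' : (pre ++ c :: u).length = pre.length + 1 + u.length := by simp; omega
        have happ : (pre ++ c :: u) ++ c2 :: v = pre ++ c :: suf := by
          rw [hsplit]; simp
        have := ih v.length hlenv s v (pre ++ c :: u) c2 res' rfl hc2
        rw [happ, hpre'] at this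
        exact this
      by_cases hsum : pvDigitVal c + pvDigitVal c2 = 10
      · simp only [if_pos hsum]
        by_cases h3 : u.count '?' ≠ 3
        · rw [if_pos (hq_iff.mpr h3), if_pos h3]
        · rw [if_neg (fun hx => h3 (hq_iff.mp hx)), if_neg h3]
          exact hstep _
      · simp only [if_neg hsum]
        exact hstep _

-- ===== VERDICT (by name: the statement is the Claim_ definition above) =====
theorem exactly_spec : Claim_equal_exactly := by
  unfold Claim_equal_exactly Spec_exactly
  intro s _
  unfold exactly exactly_alt
  rw [pv_build_eq, pv_loopA_eq_loopP s (pvDigits s.toList 0) (pvDigits s.toList 0) 0 [] (by rw [List.drop_zero]), pv_loopB_eq_process]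
  have hsplit : s.toList = s.toList.takeWhile (fun x => !(pvNumbers.contains x))
      ++ s.toList.dropWhile (fun x => !(pvNumbers.contains x)) := (List.takeWhile_append_dropWhile).symm
  have hufree : ∀ x ∈ s.toList.takeWhile (fun x => !(pvNumbers.contains x)), pvNumbers.contains x = false := by
    intro x hx
    have := List.mem_takeWhile_imp hx
    simpa using this
  cases hdd : s.toList.dropWhile (fun x => !(pvNumbers.contains x)) with
  | nil =>
    rw [hdd, List.append_nil] at hsplit
    have hdig : pvDigits s.toList 0 = [] := by
      rw [hsplit, ← List.append_nil (s.toList.takeWhile _), pv_digits_append _ hufree]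
      rfl
    have hpr : pvPairs s.toList none 0 = [] := by
      rw [hsplit]; exact pv_pairs_nil _ hufree _ _
    rw [hdig, hpr]
    rfl
  | cons c v =>
    have hc : pvNumbers.contains c = true := by
      have h2 : (s.toList.dropWhile (fun x => !(pvNumbers.contains x))) ≠ [] := by rw [hdd]; simp
      have h3 := List.head_dropWhile_not (fun x => !(pvNumbers.contains x)) h2
      have h4 : (s.toList.dropWhile (fun x => !(pvNumbers.contains x))).head h2 = c := by
        simp only [hdd, List.head_cons]
      rw [h4] at h3
      simpa using h3
    rw [hdd] at hsplit
    set u := s.toList.takeWhile (fun x => !(pvNumbers.contains x)) with hu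
    have hdig : pvDigits s.toList 0 = (c, (u.length : Int)) :: pvDigits v (u.length + 1) := by
      rw [hsplit, pv_digits_append _ hufree, pvDigits]
      simp only [hc, if_pos, Nat.zero_add]
    have hpr : pvPairs s.toList none 0 = pvPairs v (some c) 0 := by
      rw [hsplit, pv_pairs_append _ hufree _ _ _ _ hc]
    rw [hdig, hpr, hsplit]
    exact pv_main v.length s v u c [] rfl hc
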